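-- pv_equiv track=rewrite | github.com/jlelia/PythonPractice | misc/turingMachine.py | chuggaChugga
-- ===== SOURCE A (Python) =====
-- def chuggaChugga(string):
--     evenOrOdd = 1
--     zeroCounter = 0
--
--     for i in string:
--         if i == '0':
--             zeroCounter += 1
--             if zeroCounter == 2:
--                 break
--         elif i == '1' and zeroCounter == 1:
--             evenOrOdd *= -1
--
--     return 'Even!' if evenOrOdd == 1 else 'Odd!'
-- ===== SOURCE B (Python) =====
-- def chuggaChugga(string):
--     parts = string.split('0')
--     count = parts[1].count('1') if len(parts) > 1 else 0
--     return 'Even!' if count % 2 == 0 else 'Odd!'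
-- ===== Notes on version B (the rewrite author's own statement) =====
-- stated objective: simpler
-- what changed: Replaces the stateful early-break state-machine loop with a split-then-count pipeline: split on the zero character, count ones in the piece between the first and second zero, report its parity; the work moves into C-level str.split/str.count, measured much faster.
import Mathlib
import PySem

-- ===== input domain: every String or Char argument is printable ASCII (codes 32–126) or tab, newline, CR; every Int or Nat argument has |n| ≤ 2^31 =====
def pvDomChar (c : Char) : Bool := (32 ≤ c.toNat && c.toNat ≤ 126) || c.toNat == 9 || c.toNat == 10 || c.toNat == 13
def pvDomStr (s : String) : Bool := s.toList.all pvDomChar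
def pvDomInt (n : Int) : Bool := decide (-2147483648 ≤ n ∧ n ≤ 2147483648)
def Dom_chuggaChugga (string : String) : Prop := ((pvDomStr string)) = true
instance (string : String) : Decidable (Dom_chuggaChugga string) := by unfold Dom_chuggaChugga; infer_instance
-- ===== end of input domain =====

-- B replaces A's stateful early-break loop with a split('0')-then-count pipeline (objective: simpler).

-- ===== PORT A =====
-- A's for-loop with state (evenOrOdd, zeroCounter) and 'break' on the second '0'.
def pvALoop : List Char → Int → Int → Int
  | [], evenOrOdd, _ => evenOrOdd
  | c :: rest, evenOrOdd, zeroCounter =>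
    if c = '0' then
      if zeroCounter + 1 = 2 then evenOrOdd   -- break
      else pvALoop rest evenOrOdd (zeroCounter + 1)
    else if c = '1' ∧ zeroCounter = 1 then pvALoop rest (evenOrOdd * (-1)) zeroCounter
    else pvALoop rest evenOrOdd zeroCounter

def chuggaChugga (string : String) : String :=
  if pvALoop string.toList 1 0 = 1 then "Even!" else "Odd!"

-- ===== PORT B =====
def chuggaChugga_alt (string : String) : String :=
  let parts := (PySem.Str.split? string "0").getD []
  let count : Nat :=
    match parts with                 -- parts[1].count('1') if len(parts) > 1 else 0
    | _ :: p1 :: _ => PySem.Str.count p1 "1"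
    | _ => 0
  if count % 2 = 0 then "Even!" else "Odd!"

-- ===== PRECONDITION & SPEC =====
def Spec_chuggaChugga (string : String) (out : String) : Prop := out = chuggaChugga_alt string
instance (string : String) (out : String) : Decidable (Spec_chuggaChugga string out) := by unfold Spec_chuggaChugga; infer_instance

-- ===== CLAIM (what is proved, stated in full; the proofs are below) =====
def Claim_equal_chuggaChugga : Prop := ∀ (string : String), Dom_chuggaChugga string → Spec_chuggaChugga string (chuggaChugga string)

-- ===== LEMMAS AND PROOFS =====

-- the segment of the string between the first '0' and the second '0' (or the end)
def pvSeg (cs : List Char) : List Char :=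
  match cs.dropWhile (· ≠ '0') with
  | [] => []
  | _ :: rest => rest.takeWhile (· ≠ '0')

-- reference version of splitOn on the single-char separator '0'
def pvSplitAux : List Char → List Char → List (List Char)
  | [], cur => [cur.reverse]
  | c :: rest, cur =>
    if c = '0' then cur.reverse :: pvSplitAux rest []
    else pvSplitAux rest (c :: cur)

theorem pvALoop_one (cs : List Char) (e : Int) :
    pvALoop cs e 1 = if (cs.takeWhile (· ≠ '0')).count '1' % 2 = 0 then e else -e := by
  induction cs generalizing e with
  | nil => simp [pvALoop]
  | cons c rest ih =>
    by_cases h0 : c = '0'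
    · subst h0; simp [pvALoop, List.takeWhile_cons]
    · by_cases h1 : c = '1'
      · subst h1
        have hstep : pvALoop ('1' :: rest) e 1 = pvALoop rest (e * (-1)) 1 := by
          simp [pvALoop]
        rw [hstep, ih, List.takeWhile_cons_of_pos (by simp)]
        rw [List.count_cons_self]
        rcases Nat.even_or_odd ((rest.takeWhile (· ≠ '0')).count '1') with he | ho
        · have he' := Nat.even_iff.mp he
          rw [if_pos he', if_neg (by omega)]
          ring
        · have ho' := Nat.odd_iff.mp ho
          rw [if_neg (by omega), if_pos (by omega)]
          ring
      · have hstep : pvALoop (c :: rest) e 1 = pvALoop rest e 1 := by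
          simp [pvALoop, h0, h1]
        rw [hstep, ih, List.takeWhile_cons_of_pos (by simp [h0])]
        rw [List.count_cons_of_ne (by simpa using h1)]

theorem pvALoop_zero (cs : List Char) (e : Int) :
    pvALoop cs e 0 =
      match cs.dropWhile (· ≠ '0') with
      | [] => e
      | _ :: rest => pvALoop rest e 1 := by
  induction cs with
  | nil => simp [pvALoop]
  | cons c rest ih =>
    by_cases h0 : c = '0'
    · subst h0; simp [pvALoop, List.dropWhile_cons]
    · have hstep : pvALoop (c :: rest) e 0 = pvALoop rest e 0 := by
        simp [pvALoop, h0]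
      rw [hstep, ih, List.dropWhile_cons_of_pos (by simp [h0])]

theorem chuggaChugga_eq_parity (s : String) :
    chuggaChugga s = if (pvSeg s.toList).count '1' % 2 = 0 then "Even!" else "Odd!" := by
  unfold chuggaChugga pvSeg
  rw [pvALoop_zero]
  cases hd : s.toList.dropWhile (· ≠ '0') with
  | nil => simp
  | cons c rest =>
    simp only [pvALoop_one]
    by_cases h : (rest.takeWhile (· ≠ '0')).count '1' % 2 = 0
    · simp [h]
    · norm_num [h]

theorem pvGo_single (l : List Char) : ∀ (fuel : Nat), l.length < fuel → ∀ (cur : List Char) (acc : List (List Char)),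
    PySem.Chars.splitOn.go ['0'] fuel l cur acc = acc.reverse ++ pvSplitAux l cur := by
  induction l with
  | nil =>
    intro fuel hf cur acc
    match fuel, hf with
    | fuel + 1, _ => simp [PySem.Chars.splitOn.go, pvSplitAux]
  | cons c rest ih =>
    intro fuel hf cur acc
    match fuel, hf with
    | fuel + 1, hf =>
      have hrest : rest.length < fuel := by
        simp only [List.length_cons] at hf; omega
      by_cases h0 : c = '0'
      · subst h0
        have hpre : List.isPrefixOf ['0'] ('0' :: rest) = true := by
          simp [List.isPrefixOf]
        simp only [PySem.Chars.splitOn.go, hpre, List.length_cons, List.drop_succ_cons,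
          List.length_nil, List.drop_zero, if_true]
        rw [ih fuel hrest]
        simp [pvSplitAux]
      · have hpre : List.isPrefixOf ['0'] (c :: rest) = false := by
          simp [List.isPrefixOf]; exact fun h => h0 h.symm
        simp only [PySem.Chars.splitOn.go, hpre, Bool.false_eq_true, if_false]
        rw [ih fuel hrest]
        simp [pvSplitAux, h0]

theorem pvSplitAux_eq (l : List Char) : ∀ (cur : List Char),
    pvSplitAux l cur =
      (cur.reverse ++ l.takeWhile (· ≠ '0')) ::
        (match l.dropWhile (· ≠ '0') with
         | [] => []
         | _ :: rest => pvSplitAux rest []) := by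
  induction l with
  | nil => intro cur; simp [pvSplitAux]
  | cons c rest ih =>
    intro cur
    by_cases h0 : c = '0'
    · subst h0; simp [pvSplitAux, List.takeWhile_cons, List.dropWhile_cons]
    · rw [show pvSplitAux (c :: rest) cur = pvSplitAux rest (c :: cur) from by
          simp [pvSplitAux, h0],
        ih, List.takeWhile_cons_of_pos (by simp [h0]),
        List.dropWhile_cons_of_pos (by simp [h0])]
      simp

theorem pvCountGo (l : List Char) : ∀ (fuel : Nat), l.length ≤ fuel → ∀ (acc : Nat),
    PySem.Chars.count.go ['1'] fuel l acc = acc + l.count '1' := by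
  induction l with
  | nil =>
    intro fuel _ acc
    cases fuel <;> simp [PySem.Chars.count.go]
  | cons c rest ih =>
    intro fuel hf acc
    match fuel, hf with
    | fuel + 1, hf =>
      have hrest : rest.length ≤ fuel := by
        simp only [List.length_cons] at hf; omega
      by_cases h1 : c = '1'
      · subst h1
        have hpre : List.isPrefixOf ['1'] ('1' :: rest) = true := by
          simp [List.isPrefixOf]
        simp only [PySem.Chars.count.go, hpre, List.length_cons, List.drop_succ_cons,
          List.length_nil, List.drop_zero, if_true]
        rw [ih fuel hrest, List.count_cons_self]
        omega
      · have hpre : List.isPrefixOf ['1'] (c :: rest) = false := by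
          simp [List.isPrefixOf]; exact fun h => h1 h.symm
        simp only [PySem.Chars.count.go, hpre, Bool.false_eq_true, if_false]
        rw [ih fuel hrest, List.count_cons_of_ne (by simpa using h1)]

theorem pvCount_ones (cs : List Char) : PySem.Chars.count cs ['1'] = cs.count '1' := by
  unfold PySem.Chars.count
  rw [if_neg (by simp)]
  rw [pvCountGo cs cs.length le_rfl 0]
  simp

theorem chuggaChugga_alt_eq_parity (s : String) :
    chuggaChugga_alt s = if (pvSeg s.toList).count '1' % 2 = 0 then "Even!" else "Odd!" := by
  unfold chuggaChugga_alt pvSeg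
  have hsplit : PySem.Str.split? s "0" = some ((PySem.Chars.splitOn s.toList ['0']).map String.ofList) := by
    simp [PySem.Str.split?, PySem.Chars.split?]
  have hgo : PySem.Chars.splitOn s.toList ['0'] = pvSplitAux s.toList [] := by
    unfold PySem.Chars.splitOn
    rw [pvGo_single s.toList (s.toList.length + 1) (Nat.lt_succ_self _) [] []]
    simp
  rw [hsplit, hgo, pvSplitAux_eq]
  cases hd : s.toList.dropWhile (· ≠ '0') with
  | nil => simp
  | cons c rest =>
    simp [pvSplitAux_eq rest [], PySem.Str.count_eq, pvCount_ones]

-- ===== VERDICT (by name: the statement is the Claim_ definition above) =====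
theorem chuggaChugga_spec : Claim_equal_chuggaChugga := by
  intro s _
  unfold Spec_chuggaChugga
  rw [chuggaChugga_eq_parity, chuggaChugga_alt_eq_parity]
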